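-- pv_equiv track=rewrite | github.com/JUANGMONROY/Ejercicios | Ejercicio1-prepractica2.py | contarDigitosPares
-- ===== SOURCE A (Python) =====
-- def contarDigitosPares(numero):
--     pares=0
--     list2=[]
--     for i in numero:
--         pares=0
--         for k in range(i-1):
--             if (k%2==0):
--                 pares = pares + 1
--             else:
--                 pares = pares+0
--         list2.append(pares)
--     return list2
-- ===== SOURCE B (Python) =====
-- def contarDigitosPares(numero):
--     # closed form: number of even k in range(i-1) is max(0, i//2)
--     return [max(0, i // 2) for i in numero]
-- ===== Notes on version B (the rewrite author's own statement) =====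
-- stated objective: alternative
-- what changed: Replaces the inner loop over range(i-1) counting even k by the closed form max(0, i//2) per element.
import Mathlib
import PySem

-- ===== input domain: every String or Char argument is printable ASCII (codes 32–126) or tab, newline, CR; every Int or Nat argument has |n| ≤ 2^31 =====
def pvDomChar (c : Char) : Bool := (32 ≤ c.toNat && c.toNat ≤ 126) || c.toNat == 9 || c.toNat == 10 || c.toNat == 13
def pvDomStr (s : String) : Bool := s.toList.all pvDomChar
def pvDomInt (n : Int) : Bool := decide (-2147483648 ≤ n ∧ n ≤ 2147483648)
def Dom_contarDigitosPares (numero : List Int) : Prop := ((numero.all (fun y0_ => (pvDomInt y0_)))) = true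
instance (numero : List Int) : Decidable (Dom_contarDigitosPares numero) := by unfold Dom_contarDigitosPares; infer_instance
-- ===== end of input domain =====

-- B replaces A's inner counting loop by the closed form max(0, i//2) per element.

-- ===== PORT A =====
def contarDigitosPares (numero : List Int) : List Int :=
  numero.foldl (fun list2 i =>
    let pares := (PySem.List.pyRange 0 (i - 1) 1).foldl
      (fun pares k => if PySem.Int.mod k 2 == 0 then pares + 1 else pares + 0) 0
    list2 ++ [pares]) []

-- ===== PORT B =====
def contarDigitosPares_alt (numero : List Int) : List Int :=
  numero.map (fun i => max 0 (PySem.Int.floordiv i 2))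

-- ===== PRECONDITION & SPEC =====
def Spec_contarDigitosPares (numero : List Int) (out : List Int) : Prop := out = contarDigitosPares_alt numero
instance (numero : List Int) (out : List Int) : Decidable (Spec_contarDigitosPares numero out) := by unfold Spec_contarDigitosPares; infer_instance

-- ===== CLAIM (what is proved, stated in full; the proofs are below) =====
def Claim_equal_contarDigitosPares : Prop := ∀ (numero : List Int), Dom_contarDigitosPares numero → Spec_contarDigitosPares numero (contarDigitosPares numero)

-- ===== LEMMAS AND PROOFS =====

theorem pvFold (g : Int → Int) (xs : List Int) (init : List Int) :
    xs.foldl (fun l i => l ++ [g i]) init = init ++ xs.map g := by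
  induction xs generalizing init with
  | nil => simp
  | cons x xs ih => simp [List.foldl, ih]

-- counting evens in [0, n) with any accumulator
theorem pvInnerNat (n : Nat) (acc : Int) :
    (PySem.List.pyRange 0 (n : Int) 1).foldl
      (fun pares k => if PySem.Int.mod k 2 == 0 then pares + 1 else pares + 0) acc
      = acc + ((n + 1) / 2 : Nat) := by
  induction n generalizing acc with
  | zero => simp [PySem.List.pyRange_one_eq_nil]
  | succ m ih =>
      rw [show ((m + 1 : Nat) : Int) = (m : Int) + 1 by push_cast; ring,
        PySem.List.pyRange_one_succ_right (by positivity), List.foldl_append]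
      simp only [List.foldl]
      rw [ih, PySem.Int.mod_eq_emod_of_pos (by norm_num : (0:Int) < 2)]
      by_cases h : (m : Int) % 2 = 0
      · simp only [h, beq_self_eq_true, if_true]
        push_cast
        omega
      · simp only [beq_iff_eq, h, if_false]
        push_cast
        omega

theorem pvInner (i : Int) :
    (PySem.List.pyRange 0 (i - 1) 1).foldl
      (fun pares k => if PySem.Int.mod k 2 == 0 then pares + 1 else pares + 0) 0
      = max 0 (PySem.Int.floordiv i 2) := by
  rw [PySem.Int.floordiv_eq_ediv_of_pos (by norm_num : (0:Int) < 2)]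
  by_cases h : i - 1 ≤ 0
  · rw [PySem.List.pyRange_one_eq_nil h]
    simp only [List.foldl]
    omega
  · have hn : i - 1 = ((i - 1).toNat : Int) := by omega
    rw [hn, pvInnerNat]
    push_cast
    omega

-- ===== VERDICT (by name: the statement is the Claim_ definition above) =====
theorem contarDigitosPares_spec : Claim_equal_contarDigitosPares := by
  intro numero _
  unfold Spec_contarDigitosPares contarDigitosPares contarDigitosPares_alt
  rw [show (fun (list2 : List Int) (i : Int) =>
      let pares := (PySem.List.pyRange 0 (i - 1) 1).foldl
        (fun pares k => if PySem.Int.mod k 2 == 0 then pares + 1 else pares + 0) 0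
      list2 ++ [pares]) = (fun l i => l ++ [(PySem.List.pyRange 0 (i - 1) 1).foldl
        (fun pares k => if PySem.Int.mod k 2 == 0 then pares + 1 else pares + 0) 0]) from rfl,
    pvFold, List.nil_append]
  exact List.map_congr_left (fun i _ => pvInner i)
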